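-- pv_equiv track=rewrite | github.com/marawanokasha/fhv_paper_code | src/01_download/Parser.py | get_patents
-- ===== SOURCE A (Python) =====
-- def get_patents(content, year):
--     start_tag = "<?xml"
--     start_index = content.find(start_tag, 0)
--     patents = []
--
--     # while all the patents haven't been found (indicated by start value)
--     while True:
--
--         # find the next starting tag ("<?xml")
--         start = content.find(start_tag, start_index)
--
--         # if the next starting tag cannot be found all patents in the xml file have been found.
--         # return the list of all the patents contained in the xml file
--         if start == -1:
--             return [(patent, 4 if year > 2004 else 2) for patent in patents]
--
--         # if the next start tag was found, find the next start tag and save the value to end.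
--         #  append the text from start to end. then set the start to end.
--         else:
--             end = content.find(start_tag, start_index + len(start_tag))
--             if end == -1:
--                 end = len(content)
--             patents.append(content[start : end])
--             start_index = end
-- ===== SOURCE B (Python) =====
-- def get_patents(content, year):
--     tier = 4 if year > 2004 else 2
--     return [("<?xml" + part, tier) for part in content.split("<?xml")[1:]]
-- ===== Notes on version B (the rewrite author's own statement) =====
-- stated objective: idiomatic
-- what changed: Replaced the manual find/slice while-loop over start indices with a single str.split on the '<?xml' delimiter, dropping the pre-delimiter head and re-prepending the tag in a comprehension.
import Mathlib
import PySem

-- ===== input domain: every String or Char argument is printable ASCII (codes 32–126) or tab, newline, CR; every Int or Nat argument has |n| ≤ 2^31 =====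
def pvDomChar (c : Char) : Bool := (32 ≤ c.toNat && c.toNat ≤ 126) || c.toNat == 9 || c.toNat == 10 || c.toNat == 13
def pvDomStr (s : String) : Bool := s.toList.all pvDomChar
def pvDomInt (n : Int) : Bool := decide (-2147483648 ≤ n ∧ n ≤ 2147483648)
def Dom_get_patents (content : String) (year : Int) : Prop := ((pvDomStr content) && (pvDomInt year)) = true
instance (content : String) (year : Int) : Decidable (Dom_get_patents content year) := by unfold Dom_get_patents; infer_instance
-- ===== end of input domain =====

-- ===== PORT A =====
-- B replaces A's manual find/slice while-loop with one split on the "<?xml" delimiter,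
-- dropping the pre-delimiter head and re-prepending the tag (objective: idiomatic).

-- the while-True loop of A; fuel only makes the recursion total (content.toList.length + 2
-- iterations always suffice: each continuing step moves start_index forward by at least 5)
def get_patents_go (content : String) (start_index : Int) (patents : List String) : Nat → List String
  | 0 => patents
  | fuel + 1 =>
    let start := PySem.Str.findFrom content "<?xml" start_index
    if start = -1 then patents
    else
      let e0 := PySem.Str.findFrom content "<?xml" (start_index + PySem.Str.len "<?xml")
      let e := if e0 = -1 then PySem.Str.len content else e0
      get_patents_go content e (patents ++ [PySem.Str.slice content (some start) (some e)]) fuel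

def get_patents (content : String) (year : Int) : List (String × Int) :=
  let start_index := PySem.Str.findFrom content "<?xml" 0
  let patents := get_patents_go content start_index [] (content.toList.length + 2)
  patents.map (fun patent => (patent, if year > 2004 then (4 : Int) else 2))

def get_patents_alt (content : String) (year : Int) : List (String × Int) :=
  let tier : Int := if year > 2004 then 4 else 2
  ((PySem.Chars.splitOn content.toList "<?xml".toList).drop 1).map
    (fun part => (String.ofList ("<?xml".toList ++ part), tier))


-- ===== PRECONDITION & SPEC =====
def Spec_get_patents (content : String) (year : Int) (out : List (String × Int)) : Prop := out = get_patents_alt content year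
instance (content : String) (year : Int) (out : List (String × Int)) : Decidable (Spec_get_patents content year out) := by unfold Spec_get_patents; infer_instance

-- ===== CLAIM (what is proved, stated in full; the proofs are below) =====
def Claim_equal_get_patents : Prop := ∀ (content : String) (year : Int), Dom_get_patents content year → Spec_get_patents content year (get_patents content year)

-- ===== LEMMAS AND PROOFS =====

def tagL : List Char := ['<', '?', 'x', 'm', 'l']

def splitF : List Char → List (List Char)
  | [] => [[]]
  | c :: rest =>
    if h : tagL.isPrefixOf (c :: rest) then [] :: splitF (rest.drop 4)
    else match splitF rest with
      | [] => [[c]]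
      | p :: ps => (c :: p) :: ps
termination_by l => l.length
decreasing_by
  · simp
  · simp

theorem splitF_nil : splitF [] = [[]] := by simp [splitF]

theorem splitF_cons_pos (c : Char) (rest : List Char) (h : tagL <+: (c :: rest)) :
    splitF (c :: rest) = [] :: splitF (rest.drop 4) := by
  rw [splitF]
  rw [dif_pos (List.isPrefixOf_iff_prefix.mpr h)]

theorem splitF_cons_neg (c : Char) (rest : List Char) (h : ¬ tagL <+: (c :: rest)) :
    splitF (c :: rest) = match splitF rest with
      | [] => [[c]]
      | p :: ps => (c :: p) :: ps := by
  rw [splitF]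
  rw [dif_neg (fun hb => h (List.isPrefixOf_iff_prefix.mp hb))]

theorem splitF_ne_nil (l : List Char) : splitF l ≠ [] := by
  cases l with
  | nil => rw [splitF_nil]; simp
  | cons c rest =>
    by_cases h : tagL <+: (c :: rest)
    · rw [splitF_cons_pos _ _ h]; simp
    · rw [splitF_cons_neg _ _ h]
      cases splitF rest <;> simp

theorem find_eq_of (u sub : List Char) (k : Nat) (hk : sub <+: u.drop k)
    (hmin : ∀ i < k, ¬ sub <+: u.drop i) : PySem.Chars.find u sub = (k : Int) := by
  have hin : sub <:+: u := (hk.isInfix).trans (List.drop_suffix k u).isInfix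
  have hnn : 0 ≤ PySem.Chars.find u sub := (PySem.Chars.find_nonneg_iff u sub).mpr hin
  obtain ⟨hocc, hm⟩ := PySem.Chars.find_spec hnn
  rcases lt_trichotomy (PySem.Chars.find u sub).toNat k with h | h | h
  · exact absurd hocc (hmin _ h)
  · omega
  · exact absurd hk (hm _ h)

theorem find_of_prefix (u sub : List Char) (h : sub <+: u) : PySem.Chars.find u sub = 0 :=
  find_eq_of u sub 0 (by simpa) (by omega)

theorem splitF_of_not_infix (t : List Char) (h : ¬ tagL <:+: t) : splitF t = [t] := by
  induction t with
  | nil => exact splitF_nil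
  | cons c rest ih =>
    have hnp : ¬ tagL <+: (c :: rest) := fun hp => h hp.isInfix
    have hrest : ¬ tagL <:+: rest := fun hi => h (List.infix_cons hi)
    rw [splitF_cons_neg _ _ hnp, ih hrest]

theorem splitF_of_find_neg (t : List Char) (h : PySem.Chars.find t tagL = -1) :
    splitF t = [t] :=
  splitF_of_not_infix t ((PySem.Chars.find_eq_neg_one_iff t _).mp h)

theorem splitF_of_find_nonneg_aux : ∀ (n : Nat) (t : List Char), t.length = n →
    0 ≤ PySem.Chars.find t tagL →
    splitF t = t.take (PySem.Chars.find t tagL).toNat ::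
      splitF (t.drop ((PySem.Chars.find t tagL).toNat + 5)) := by
  intro n
  induction n using Nat.strong_induction_on with
  | _ n IH =>
    intro t hlen h
    obtain ⟨hocc, hmin⟩ := PySem.Chars.find_spec h
    by_cases hp : tagL <+: t
    · have h0 : PySem.Chars.find t tagL = 0 := find_of_prefix t _ hp
      obtain ⟨c, rest, rfl⟩ : ∃ c rest, t = c :: rest := by
        rcases t with _ | ⟨c, rest⟩
        · exact absurd (List.prefix_nil.mp hp) (by simp [tagL])
        · exact ⟨c, rest, rfl⟩
      rw [h0]
      simpa using splitF_cons_pos c rest hp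
    · have hne : t ≠ [] := by
        intro he; subst he
        simp only [List.drop_nil] at hocc
        exact hp hocc
      obtain ⟨c, rest, rfl⟩ := List.exists_cons_of_ne_nil hne
      set k := (PySem.Chars.find (c :: rest) tagL).toNat with hk
      have hkpos : 0 < k := by
        rcases Nat.eq_zero_or_pos k with h0 | h0
        · rw [h0] at hocc; simp only [List.drop_zero] at hocc; exact absurd hocc hp
        · exact h0
      have hdrop : (c :: rest).drop k = rest.drop (k - 1) := by
        have hh : k = (k - 1) + 1 := by omega
        rw [hh]; rfl
      have hfr : PySem.Chars.find rest tagL = ((k - 1 : Nat) : Int) := by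
        apply find_eq_of
        · rw [← hdrop]; exact hocc
        · intro i hi
          have hh : (c :: rest).drop (i + 1) = rest.drop i := rfl
          rw [← hh]
          exact hmin (i + 1) (by omega)
      have hfrn : 0 ≤ PySem.Chars.find rest tagL := by rw [hfr]; positivity
      have hrec := IH rest.length (by simp [← hlen]) rest rfl hfrn
      rw [hfr, Int.toNat_natCast] at hrec
      rw [splitF_cons_neg _ _ hp, hrec]
      have ht : (c :: rest).take k = c :: rest.take (k - 1) := by
        have hh : k = (k - 1) + 1 := by omega
        rw [hh]; rfl
      have hd : (c :: rest).drop (k + 5) = rest.drop ((k - 1) + 5) := by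
        have hh : k + 5 = ((k - 1) + 5) + 1 := by omega
        rw [hh]; rfl
      rw [ht, hd]

theorem splitF_of_find_nonneg (t : List Char) (h : 0 ≤ PySem.Chars.find t tagL) :
    splitF t = t.take (PySem.Chars.find t tagL).toNat ::
      splitF (t.drop ((PySem.Chars.find t tagL).toNat + 5)) :=
  splitF_of_find_nonneg_aux t.length t rfl h

theorem splitOn_go_eq : ∀ (fuel : Nat) (l cur : List Char) (acc : List (List Char)),
    l.length < fuel →
    PySem.Chars.splitOn.go tagL fuel l cur acc =
      acc.reverse ++ (splitF l).modifyHead (fun p => cur.reverse ++ p) := by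
  intro fuel
  induction fuel with
  | zero => intro l cur acc h; omega
  | succ f ih =>
    intro l cur acc h
    match l with
    | [] =>
      rw [PySem.Chars.splitOn.go, splitF_nil]
      · simp
      · omega
    | c :: rest =>
      rw [PySem.Chars.splitOn.go]
      by_cases hp : tagL <+: (c :: rest)
      · have hb : tagL.isPrefixOf (c :: rest) = true := List.isPrefixOf_iff_prefix.mpr hp
        simp only [hb, if_true]
        have hlt : ((c :: rest).drop tagL.length).length < f := by
          simp [tagL] at h ⊢; omega
        rw [ih _ _ _ hlt, splitF_cons_pos _ _ hp]
        have hdd : (c :: rest).drop tagL.length = rest.drop 4 := rfl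
        rw [hdd]
        simp
        rcases splitF (rest.drop 4) with _ | ⟨p, ps⟩ <;> simp
      · have hb : tagL.isPrefixOf (c :: rest) = false := by
          rw [← Bool.not_eq_true]
          exact fun hb => hp (List.isPrefixOf_iff_prefix.mp hb)
        simp only [hb]
        have hlt : rest.length < f := by simp at h; omega
        rw [ih _ _ _ hlt, splitF_cons_neg _ _ hp]
        rcases hsf : splitF rest with _ | ⟨p, ps⟩
        · exact absurd hsf (splitF_ne_nil rest)
        · simp [List.append_assoc]

theorem splitOn_eq_splitF (l : List Char) :
    PySem.Chars.splitOn l tagL = splitF l := by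
  rw [PySem.Chars.splitOn, splitOn_go_eq (l.length + 1) l [] [] (by omega)]
  simp only [List.reverse_nil, List.nil_append]
  cases hsf : splitF l <;> simp

theorem findFrom_of_not_infix (s sub : List Char) (z : Int) (h : ¬ sub <:+: s) :
    PySem.Chars.findFrom s sub z none = -1 := by
  have hfind : ∀ (a b : Nat), PySem.Chars.find (List.drop a (List.take b s)) sub = -1 := by
    intro a b
    rw [PySem.Chars.find_eq_neg_one_iff]
    intro hin
    exact h (hin.trans (((List.drop_suffix _ _).isInfix).trans (List.take_prefix _ _).isInfix))
  rw [PySem.Chars.findFrom]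
  simp only [hfind]
  simp

theorem htagL : "<?xml".toList = tagL := by decide

theorem drop_eq_tag_append (s : List Char) (i : Nat) (h : tagL <+: s.drop i) :
    s.drop i = tagL ++ s.drop (i + 5) ∧ s.drop (i + 5) = (s.drop i).drop 5 := by
  have h5 : tagL.length = 5 := by decide
  have hdd : s.drop (i + 5) = (s.drop i).drop 5 := by
    rw [List.drop_drop, Nat.add_comm]
  refine ⟨?_, hdd⟩
  obtain ⟨u, hu⟩ := h
  rw [hdd, ← hu, ← h5, List.drop_left]

theorem loop_eq (s : String) : ∀ (fuel : Nat) (i : Nat) (patents : List String),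
    tagL <+: s.toList.drop i → s.toList.length - i < fuel →
    get_patents_go s (i : Int) patents fuel =
      patents ++ (splitF (s.toList.drop (i + 5))).map
        (fun p => String.ofList (tagL ++ p)) := by
  intro fuel
  induction fuel with
  | zero =>
    intro i patents hpre hfuel
    omega
  | succ f ih =>
    intro i patents hpre hfuel
    have h5 : tagL.length = 5 := by decide
    have hlen5 : 5 ≤ (s.toList.drop i).length := h5 ▸ hpre.length_le
    have hni : 5 ≤ s.toList.length - i ∧ i + 5 ≤ s.toList.length := by
      rw [List.length_drop] at hlen5; omega
    have hi5 : i + 5 ≤ s.toList.length := hni.2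
    obtain ⟨htag, hdd⟩ := drop_eq_tag_append s.toList i hpre
    have hstart : PySem.Str.findFrom s "<?xml" (i : Int) = (i : Int) := by
      rw [PySem.Str.findFrom, htagL]
      rw [PySem.Chars.findFrom_natCast _ _ i (by omega)]
      rw [find_of_prefix _ _ hpre]
      simp
    have hlen_tag : PySem.Str.len "<?xml" = (5 : Int) := by decide
    have hcast : (i : Int) + PySem.Str.len "<?xml" = ((i + 5 : Nat) : Int) := by
      rw [hlen_tag]; push_cast; ring
    have he0 : PySem.Str.findFrom s "<?xml" ((i : Int) + PySem.Str.len "<?xml") =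
        if PySem.Chars.find (s.toList.drop (i + 5)) tagL = -1 then -1
        else ((i + 5 : Nat) : Int) + PySem.Chars.find (s.toList.drop (i + 5)) tagL := by
      rw [hcast, PySem.Str.findFrom, htagL]
      exact PySem.Chars.findFrom_natCast _ _ (i + 5) hi5
    rw [get_patents_go]
    simp only [hstart, he0]
    rw [if_neg (by omega)]
    by_cases hneg : PySem.Chars.find (s.toList.drop (i + 5)) tagL = -1
    · -- last chunk: e = len(content)
      rw [if_pos hneg, if_pos rfl]
      have hchunk : PySem.Str.slice s (some (i : Int)) (some ((s.toList.length : Nat) : Int)) =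
          String.ofList (tagL ++ s.toList.drop (i + 5)) := by
        rw [PySem.Str.slice, ← htag]
        congr 1
        rw [PySem.Chars.slice_eq_listSlice]
        rw [PySem.List.slice_natCast]
        rw [List.take_of_length_le (by rw [List.length_drop])]
      have hend : PySem.Str.len s = ((s.toList.length : Nat) : Int) := rfl
      have hf1 : 0 < f := by omega
      obtain ⟨f', rfl⟩ : ∃ f', f = f' + 1 := ⟨f - 1, by omega⟩
      rw [hend, get_patents_go]
      have hstop : PySem.Str.findFrom s "<?xml" ((s.toList.length : Nat) : Int) = -1 := by
        rw [PySem.Str.findFrom, htagL]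
        rw [PySem.Chars.findFrom_natCast _ _ s.toList.length (by omega)]
        rw [List.drop_length]
        have hnil : PySem.Chars.find [] tagL = -1 := by decide
        rw [hnil]
        simp
      rw [hstop, if_pos rfl]
      rw [splitF_of_find_neg _ hneg, hchunk]
      simp
    · -- inner chunk: e = next occurrence
      rw [if_neg hneg]
      have hnn : 0 ≤ PySem.Chars.find (s.toList.drop (i + 5)) tagL := by
        have := PySem.Chars.neg_one_le_find (s.toList.drop (i + 5)) tagL
        omega
      set j := (PySem.Chars.find (s.toList.drop (i + 5)) tagL).toNat with hj
      have hjc : PySem.Chars.find (s.toList.drop (i + 5)) tagL = (j : Int) := by omega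
      rw [if_neg (by rw [hjc]; omega)]
      have hcast2 : ((i + 5 : Nat) : Int) + PySem.Chars.find (s.toList.drop (i + 5)) tagL
          = ((i + 5 + j : Nat) : Int) := by rw [hjc]; push_cast; ring
      rw [hcast2]
      obtain ⟨hocc, -⟩ := PySem.Chars.find_spec hnn
      rw [← hj] at hocc
      have hocc' : tagL <+: s.toList.drop (i + 5 + j) := by
        have hh : List.drop j (List.drop (i + 5) s.toList) = List.drop (i + 5 + j) s.toList := by
          rw [List.drop_drop]
        rwa [hh] at hocc
      have hlen5' : 5 ≤ (s.toList.drop (i + 5 + j)).length := h5 ▸ hocc'.length_le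
      have hij5 : i + 5 + j + 5 ≤ s.toList.length := by
        rw [List.length_drop] at hlen5'; omega
      rw [ih (i + 5 + j) _ hocc' (by omega)]
      rw [splitF_of_find_nonneg _ hnn, ← hj]
      have hchunk : PySem.Str.slice s (some (i : Int)) (some ((i + 5 + j : Nat) : Int)) =
          String.ofList (tagL ++ (s.toList.drop (i + 5)).take j) := by
        rw [PySem.Str.slice]
        congr 1
        rw [PySem.Chars.slice_eq_listSlice, PySem.List.slice_natCast]
        have h1 : i + 5 + j - i = tagL.length + j := by rw [h5]; omega
        rw [h1, htag, List.take_length_add_append]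
      have hd : (s.toList.drop (i + 5)).drop (j + 5) = s.toList.drop (i + 5 + j + 5) := by
        rw [List.drop_drop]
        congr 1
      rw [hchunk, hd]
      simp

theorem get_patents_eq (content : String) (year : Int) :
    get_patents content year = get_patents_alt content year := by
  unfold get_patents get_patents_alt
  simp only [htagL]
  rw [splitOn_eq_splitF]
  have hsf0 : PySem.Str.findFrom content "<?xml" 0 = PySem.Chars.find content.toList tagL := by
    rw [PySem.Str.findFrom, htagL]
    exact PySem.Chars.findFrom_zero _ _
  by_cases h0 : PySem.Chars.find content.toList tagL = -1
  · have hni : ¬ tagL <:+: content.toList := (PySem.Chars.find_eq_neg_one_iff _ _).mp h0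
    rw [hsf0, h0]
    have h2 : content.toList.length + 2 = (content.toList.length + 1) + 1 := rfl
    rw [h2, get_patents_go]
    have hstart : PySem.Str.findFrom content "<?xml" (-1) = -1 := by
      rw [PySem.Str.findFrom, htagL]
      exact findFrom_of_not_infix _ _ _ hni
    rw [hstart, if_pos rfl]
    rw [splitF_of_not_infix _ hni]
    simp
  · have hnn : 0 ≤ PySem.Chars.find content.toList tagL := by
      have := PySem.Chars.neg_one_le_find content.toList tagL
      omega
    set k := (PySem.Chars.find content.toList tagL).toNat with hk
    have hkc : PySem.Chars.find content.toList tagL = (k : Int) := by omega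
    obtain ⟨hocc, -⟩ := PySem.Chars.find_spec hnn
    rw [← hk] at hocc
    rw [hsf0, hkc]
    rw [loop_eq content _ k [] hocc (by omega)]
    rw [splitF_of_find_nonneg _ hnn, ← hk]
    simp

-- ===== VERDICT (by name: the statement is the Claim_ definition above) =====
theorem get_patents_spec : Claim_equal_get_patents := by
  intro content year _
  exact get_patents_eq content year
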